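-- pv_equiv track=rewrite | github.com/ZsEun/CST_simplifier | code/run_sunray_v4.py | _union_bbox
-- ===== SOURCE A (Python) =====
-- def _union_bbox(face_ids, bboxes):
--     bb = None
--     for fid in face_ids:
--         fb = bboxes.get(fid)
--         if fb is None:
--             continue
--         if bb is None:
--             bb = list(fb)
--         else:
--             for i in range(3):
--                 bb[i] = min(bb[i], fb[i])
--             for i in range(3, 6):
--                 bb[i] = max(bb[i], fb[i])
--     return tuple(bb) if bb else (0, 0, 0, 0, 0, 0)
-- ===== SOURCE B (Python) =====
-- def _union_bbox(face_ids, bboxes):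
--     valid = [fb for fb in (bboxes.get(fid) for fid in face_ids) if fb is not None]
--     if not valid:
--         return (0, 0, 0, 0, 0, 0)
--     bb = list(valid[0])
--     for i in range(3):
--         bb[i] = min(fb[i] for fb in valid)
--     for i in range(3, 6):
--         bb[i] = max(fb[i] for fb in valid)
--     return tuple(bb)
-- ===== Notes on version B (the rewrite author's own statement) =====
-- stated objective: alternative
-- what changed: B first collects the valid bboxes with one comprehension, then reduces column-wise (outer loop over the six coordinates, inner min/max over faces), instead of A's single face-by-face fold carried in a mutable accumulator.
import Mathlib
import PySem

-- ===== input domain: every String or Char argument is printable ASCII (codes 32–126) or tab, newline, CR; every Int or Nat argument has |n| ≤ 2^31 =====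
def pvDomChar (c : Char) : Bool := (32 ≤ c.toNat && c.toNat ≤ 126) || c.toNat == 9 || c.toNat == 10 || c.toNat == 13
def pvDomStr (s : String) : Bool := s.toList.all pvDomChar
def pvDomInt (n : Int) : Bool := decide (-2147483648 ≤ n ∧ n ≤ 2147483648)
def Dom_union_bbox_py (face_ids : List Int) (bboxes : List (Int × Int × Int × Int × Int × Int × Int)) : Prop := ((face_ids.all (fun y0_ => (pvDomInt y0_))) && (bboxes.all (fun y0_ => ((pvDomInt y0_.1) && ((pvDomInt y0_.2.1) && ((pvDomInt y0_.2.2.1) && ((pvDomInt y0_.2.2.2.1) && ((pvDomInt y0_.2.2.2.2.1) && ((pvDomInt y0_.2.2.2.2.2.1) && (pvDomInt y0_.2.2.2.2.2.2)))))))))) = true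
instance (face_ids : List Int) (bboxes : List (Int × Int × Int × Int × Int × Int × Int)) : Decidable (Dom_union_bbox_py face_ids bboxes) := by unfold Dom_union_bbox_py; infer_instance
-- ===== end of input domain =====

-- B collects the valid bboxes first, then reduces column-wise (min/max per coordinate);
-- A folds face-by-face in one accumulator. Objective: alternative decomposition, same cost.


-- ===== PORT A =====
-- the element-wise min/max merge done by A's two inner 'for i in range' loops
def pvMergeA (b fb : Int × Int × Int × Int × Int × Int) : Int × Int × Int × Int × Int × Int :=
  (min b.1 fb.1, min b.2.1 fb.2.1, min b.2.2.1 fb.2.2.1,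
   max b.2.2.2.1 fb.2.2.2.1, max b.2.2.2.2.1 fb.2.2.2.2.1, max b.2.2.2.2.2 fb.2.2.2.2.2)

-- A's 'for fid in face_ids' loop carrying the optional accumulator bb
def pvLoopA (d : PySem.Dict Int (Int × Int × Int × Int × Int × Int)) :
    List Int → Option (Int × Int × Int × Int × Int × Int) → Option (Int × Int × Int × Int × Int × Int)
  | [], bb => bb
  | fid :: rest, bb =>
    match d.get? fid with
    | none => pvLoopA d rest bb
    | some fb =>
      match bb with
      | none => pvLoopA d rest (some fb)
      | some b => pvLoopA d rest (some (pvMergeA b fb))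

def union_bbox_py (face_ids : List Int) (bboxes : List (Int × Int × Int × Int × Int × Int × Int)) : Int × Int × Int × Int × Int × Int :=
  match pvLoopA (PySem.Dict.ofList bboxes) face_ids none with
  | none => (0, 0, 0, 0, 0, 0)
  | some bb => bb

-- ===== PORT B =====
def union_bbox_py_alt (face_ids : List Int) (bboxes : List (Int × Int × Int × Int × Int × Int × Int)) : Int × Int × Int × Int × Int × Int :=
  let d := PySem.Dict.ofList bboxes
  let valid := face_ids.filterMap (fun fid => d.get? fid)
  match valid with
  | [] => (0, 0, 0, 0, 0, 0)
  | v :: _ =>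
    ((valid.map (·.1)).foldl min v.1,
     (valid.map (·.2.1)).foldl min v.2.1,
     (valid.map (·.2.2.1)).foldl min v.2.2.1,
     (valid.map (·.2.2.2.1)).foldl max v.2.2.2.1,
     (valid.map (·.2.2.2.2.1)).foldl max v.2.2.2.2.1,
     (valid.map (·.2.2.2.2.2)).foldl max v.2.2.2.2.2)

-- ===== PRECONDITION & SPEC =====
def Spec_union_bbox_py (face_ids : List Int) (bboxes : List (Int × Int × Int × Int × Int × Int × Int)) (out : Int × Int × Int × Int × Int × Int) : Prop := out = union_bbox_py_alt face_ids bboxes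
instance (face_ids : List Int) (bboxes : List (Int × Int × Int × Int × Int × Int × Int)) (out : Int × Int × Int × Int × Int × Int) : Decidable (Spec_union_bbox_py face_ids bboxes out) := by unfold Spec_union_bbox_py; infer_instance

-- ===== CLAIM (what is proved, stated in full; the proofs are below) =====
def Claim_equal_union_bbox_py : Prop := ∀ (face_ids : List Int) (bboxes : List (Int × Int × Int × Int × Int × Int × Int)), Dom_union_bbox_py face_ids bboxes → Spec_union_bbox_py face_ids bboxes (union_bbox_py face_ids bboxes)

-- ===== LEMMAS AND PROOFS =====
-- A's loop with a live accumulator folds pvMergeA over the valid bboxes of the rest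
theorem pvLoopA_some (d : PySem.Dict Int (Int × Int × Int × Int × Int × Int)) (ids : List Int)
    (b : Int × Int × Int × Int × Int × Int) :
    pvLoopA d ids (some b) = some ((ids.filterMap (fun fid => d.get? fid)).foldl pvMergeA b) := by
  induction ids generalizing b with
  | nil => simp [pvLoopA]
  | cons fid rest ih =>
    simp only [pvLoopA, List.filterMap_cons]
    cases d.get? fid with
    | none => simp [ih]
    | some fb => simp [ih]

-- A's loop from the initial None state
theorem pvLoopA_none (d : PySem.Dict Int (Int × Int × Int × Int × Int × Int)) (ids : List Int) :
    pvLoopA d ids none =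
      match ids.filterMap (fun fid => d.get? fid) with
      | [] => none
      | v :: rest => some (rest.foldl pvMergeA v) := by
  induction ids with
  | nil => simp [pvLoopA]
  | cons fid rest ih =>
    simp only [pvLoopA, List.filterMap_cons]
    cases d.get? fid with
    | none => simpa using ih
    | some fb => simp [pvLoopA_some]

-- folding the merged tuple = the six column-wise folds
theorem foldl_merge_cols (l : List (Int × Int × Int × Int × Int × Int))
    (b : Int × Int × Int × Int × Int × Int) :
    l.foldl pvMergeA b =
      ((l.map (·.1)).foldl min b.1,
       (l.map (·.2.1)).foldl min b.2.1,
       (l.map (·.2.2.1)).foldl min b.2.2.1,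
       (l.map (·.2.2.2.1)).foldl max b.2.2.2.1,
       (l.map (·.2.2.2.2.1)).foldl max b.2.2.2.2.1,
       (l.map (·.2.2.2.2.2)).foldl max b.2.2.2.2.2) := by
  induction l generalizing b with
  | nil => simp [List.foldl]
  | cons x xs ih => simp [List.foldl, ih, pvMergeA]

-- ===== VERDICT (by name: the statement is the Claim_ definition above) =====
theorem union_bbox_py_spec : Claim_equal_union_bbox_py := by
  intro face_ids bboxes _
  unfold Spec_union_bbox_py union_bbox_py union_bbox_py_alt
  rw [pvLoopA_none]
  cases h : face_ids.filterMap (fun fid => (PySem.Dict.ofList bboxes).get? fid) with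
  | nil => simp [h]
  | cons v rest =>
    simp only [h, foldl_merge_cols, List.map_cons, List.foldl_cons, min_self, max_self]
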